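-- pv_equiv track=rewrite | github.com/mattwerner-sudo/lunch-perk-scraper | location_lookup.py | _city_market
-- ===== SOURCE A (Python) =====
-- _MARKET_CITY_SIGNALS: list[tuple[str, list[tuple[str, str | None]]]] = [
--     # (market, [(city_lower, state_lower_or_None), ...])
--     ("New York",      [("new york", None), ("manhattan", None), ("brooklyn", None),
--                        ("queens", None), ("bronx", None), ("jersey city", "new jersey"),
--                        ("hoboken", "new jersey")]),
--     ("Boston",        [("boston", None), ("cambridge", "massachusetts"),
--                        ("somerville", "massachusetts"), ("quincy", "massachusetts")]),
--     ("Chicago",       [("chicago", None)]),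
--     ("San Francisco", [("san francisco", None), ("palo alto", None), ("mountain view", None),
--                        ("redwood city", None), ("menlo park", None), ("san mateo", None),
--                        ("sunnyvale", None), ("santa clara", None), ("oakland", None),
--                        ("san jose", None), ("foster city", None), ("burlingame", None)]),
--     ("Los Angeles",   [("los angeles", None), ("santa monica", None), ("culver city", None),
--                        ("el segundo", None), ("manhattan beach", None), ("west hollywood", None),
--                        ("pasadena", None), ("burbank", None), ("glendale", "california"),
--                        ("long beach", "california"), ("irvine", None), ("anaheim", None)]),
--     ("Seattle",       [("seattle", None), ("bellevue", "washington"), ("redmond", "washington"),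
--                        ("kirkland", "washington"), ("tacoma", None)]),
--     ("Austin",        [("austin", "texas")]),
--     ("Dallas",        [("dallas", None), ("fort worth", None), ("plano", "texas"),
--                        ("irving", "texas"), ("frisco", "texas"), ("allen", "texas"),
--                        ("arlington", "texas")]),
--     ("Houston",       [("houston", None), ("the woodlands", None), ("sugar land", None),
--                        ("katy", "texas")]),
--     ("Atlanta",       [("atlanta", None), ("alpharetta", None), ("buckhead", None),
--                        ("marietta", None), ("dunwoody", None)]),
--     ("Washington DC", [("washington", "district of columbia"), ("washington", "dc"),
--                        ("arlington", "virginia"), ("bethesda", "maryland"),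
--                        ("mclean", "virginia"), ("tysons", None), ("reston", "virginia"),
--                        ("falls church", None), ("alexandria", "virginia")]),
--     ("Philadelphia",  [("philadelphia", None), ("wilmington", "delaware"),
--                        ("cherry hill", None), ("king of prussia", None)]),
--     ("Miami",         [("miami", None), ("fort lauderdale", None), ("boca raton", None),
--                        ("coral gables", None), ("doral", None)]),
--     ("Denver",        [("denver", None), ("boulder", "colorado"), ("aurora", "colorado"),
--                        ("lakewood", "colorado"), ("englewood", "colorado")]),
--     ("Minneapolis",   [("minneapolis", None), ("st. paul", None), ("saint paul", None),
--                        ("bloomington", "minnesota"), ("eden prairie", None)]),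
--     ("Phoenix",       [("phoenix", None), ("scottsdale", None), ("tempe", "arizona"),
--                        ("chandler", "arizona"), ("mesa", "arizona"), ("gilbert", "arizona")]),
--     ("Nashville",     [("nashville", None), ("franklin", "tennessee"), ("brentwood", "tennessee")]),
--     ("Charlotte",     [("charlotte", "north carolina")]),
--     ("Raleigh",       [("raleigh", None), ("durham", None), ("chapel hill", None), ("cary", None)]),
--     ("Indianapolis",  [("indianapolis", None)]),
--     ("Columbus",      [("columbus", "ohio")]),
--     ("San Diego",     [("san diego", None)]),
--     ("Portland",      [("portland", "oregon")]),
--     ("Salt Lake City",[("salt lake city", None), ("provo", None)]),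
--     ("Kansas City",   [("kansas city", None), ("overland park", None)]),
--     ("St. Louis",     [("st. louis", None), ("saint louis", None)]),
--     ("Detroit",       [("detroit", None), ("ann arbor", None), ("troy", "michigan"),
--                        ("dearborn", None)]),
--     ("Pittsburgh",    [("pittsburgh", None)]),
--     ("Cincinnati",    [("cincinnati", None)]),
--     ("Cleveland",     [("cleveland", None)]),
--     ("Baltimore",     [("baltimore", None)]),
--     ("San Antonio",   [("san antonio", None)]),
--     ("Orlando",       [("orlando", None)]),
--     ("Tampa",         [("tampa", None), ("st. petersburg", "florida"), ("clearwater", None)]),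
--     ("Las Vegas",     [("las vegas", None), ("henderson", "nevada")]),
-- ]
--
-- def _city_market(city: str, state: str) -> str:
--     city_l  = city.strip().lower()
--     state_l = state.strip().lower()
--     for market, signals in _MARKET_CITY_SIGNALS:
--         for sig_city, sig_state in signals:
--             if city_l == sig_city and (sig_state is None or sig_state in state_l):
--                 return market
--     return "Other"
-- ===== SOURCE B (Python) =====
-- # B keeps the signal table as compact encoded "city|state|market" records, parsed
-- # once at import time into a city-keyed index; a call is one dict lookup plus a short scan.
-- _SIGNAL_RECS = [
--     'new york||New York',
--     'manhattan||New York',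
--     'brooklyn||New York',
--     'queens||New York',
--     'bronx||New York',
--     'jersey city|new jersey|New York',
--     'hoboken|new jersey|New York',
--     'boston||Boston',
--     'cambridge|massachusetts|Boston',
--     'somerville|massachusetts|Boston',
--     'quincy|massachusetts|Boston',
--     'chicago||Chicago',
--     'san francisco||San Francisco',
--     'palo alto||San Francisco',
--     'mountain view||San Francisco',
--     'redwood city||San Francisco',
--     'menlo park||San Francisco',
--     'san mateo||San Francisco',
--     'sunnyvale||San Francisco',
--     'santa clara||San Francisco',
--     'oakland||San Francisco',
--     'san jose||San Francisco',
--     'foster city||San Francisco',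
--     'burlingame||San Francisco',
--     'los angeles||Los Angeles',
--     'santa monica||Los Angeles',
--     'culver city||Los Angeles',
--     'el segundo||Los Angeles',
--     'manhattan beach||Los Angeles',
--     'west hollywood||Los Angeles',
--     'pasadena||Los Angeles',
--     'burbank||Los Angeles',
--     'glendale|california|Los Angeles',
--     'long beach|california|Los Angeles',
--     'irvine||Los Angeles',
--     'anaheim||Los Angeles',
--     'seattle||Seattle',
--     'bellevue|washington|Seattle',
--     'redmond|washington|Seattle',
--     'kirkland|washington|Seattle',
--     'tacoma||Seattle',
--     'austin|texas|Austin',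
--     'dallas||Dallas',
--     'fort worth||Dallas',
--     'plano|texas|Dallas',
--     'irving|texas|Dallas',
--     'frisco|texas|Dallas',
--     'allen|texas|Dallas',
--     'arlington|texas|Dallas',
--     'houston||Houston',
--     'the woodlands||Houston',
--     'sugar land||Houston',
--     'katy|texas|Houston',
--     'atlanta||Atlanta',
--     'alpharetta||Atlanta',
--     'buckhead||Atlanta',
--     'marietta||Atlanta',
--     'dunwoody||Atlanta',
--     'washington|district of columbia|Washington DC',
--     'washington|dc|Washington DC',
--     'arlington|virginia|Washington DC',
--     'bethesda|maryland|Washington DC',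
--     'mclean|virginia|Washington DC',
--     'tysons||Washington DC',
--     'reston|virginia|Washington DC',
--     'falls church||Washington DC',
--     'alexandria|virginia|Washington DC',
--     'philadelphia||Philadelphia',
--     'wilmington|delaware|Philadelphia',
--     'cherry hill||Philadelphia',
--     'king of prussia||Philadelphia',
--     'miami||Miami',
--     'fort lauderdale||Miami',
--     'boca raton||Miami',
--     'coral gables||Miami',
--     'doral||Miami',
--     'denver||Denver',
--     'boulder|colorado|Denver',
--     'aurora|colorado|Denver',
--     'lakewood|colorado|Denver',
--     'englewood|colorado|Denver',
--     'minneapolis||Minneapolis',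
--     'st. paul||Minneapolis',
--     'saint paul||Minneapolis',
--     'bloomington|minnesota|Minneapolis',
--     'eden prairie||Minneapolis',
--     'phoenix||Phoenix',
--     'scottsdale||Phoenix',
--     'tempe|arizona|Phoenix',
--     'chandler|arizona|Phoenix',
--     'mesa|arizona|Phoenix',
--     'gilbert|arizona|Phoenix',
--     'nashville||Nashville',
--     'franklin|tennessee|Nashville',
--     'brentwood|tennessee|Nashville',
--     'charlotte|north carolina|Charlotte',
--     'raleigh||Raleigh',
--     'durham||Raleigh',
--     'chapel hill||Raleigh',
--     'cary||Raleigh',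
--     'indianapolis||Indianapolis',
--     'columbus|ohio|Columbus',
--     'san diego||San Diego',
--     'portland|oregon|Portland',
--     'salt lake city||Salt Lake City',
--     'provo||Salt Lake City',
--     'kansas city||Kansas City',
--     'overland park||Kansas City',
--     'st. louis||St. Louis',
--     'saint louis||St. Louis',
--     'detroit||Detroit',
--     'ann arbor||Detroit',
--     'troy|michigan|Detroit',
--     'dearborn||Detroit',
--     'pittsburgh||Pittsburgh',
--     'cincinnati||Cincinnati',
--     'cleveland||Cleveland',
--     'baltimore||Baltimore',
--     'san antonio||San Antonio',
--     'orlando||Orlando',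
--     'tampa||Tampa',
--     'st. petersburg|florida|Tampa',
--     'clearwater||Tampa',
--     'las vegas||Las Vegas',
--     'henderson|nevada|Las Vegas',
-- ]
--
-- _CITY_INDEX: dict = {}
-- for _rec in _SIGNAL_RECS:
--     _c, _s, _m = _rec.split("|")
--     _CITY_INDEX.setdefault(_c, []).append((_s or None, _m))
--
--
-- def _city_market(city: str, state: str) -> str:
--     state_l = state.strip().lower()
--     for sig_state, market in _CITY_INDEX.get(city.strip().lower(), []):
--         if sig_state is None or sig_state in state_l:
--             return market
--     return "Other"
-- ===== Notes on version B (the rewrite author's own statement) =====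
-- stated objective: alternative
-- what changed: B stores the signal table as one compact 'city|state|market' encoded string, parses it once at import time into a city-keyed index (dict of ordered (state,market) candidate lists), and a call does one dict lookup plus a short per-city candidate scan instead of A's full nested scan over every market's signal list.
import Mathlib
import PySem

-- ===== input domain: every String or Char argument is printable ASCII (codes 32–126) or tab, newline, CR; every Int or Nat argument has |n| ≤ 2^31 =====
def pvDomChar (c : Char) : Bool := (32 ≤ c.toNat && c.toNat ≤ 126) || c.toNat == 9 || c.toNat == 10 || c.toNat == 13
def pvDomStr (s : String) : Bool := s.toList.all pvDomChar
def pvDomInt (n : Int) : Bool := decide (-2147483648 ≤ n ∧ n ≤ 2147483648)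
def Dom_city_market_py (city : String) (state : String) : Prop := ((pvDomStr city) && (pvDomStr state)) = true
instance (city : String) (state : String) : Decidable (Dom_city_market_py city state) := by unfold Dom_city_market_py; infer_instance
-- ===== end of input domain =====

-- B replaces A's per-call nested scan of the market table by a city-keyed index parsed
-- once from a compact encoded string; return values proved equal on all of Dom.

-- ===== PORT A =====
-- the module constant _MARKET_CITY_SIGNALS (used by A)
def marketCitySignals : List (String × List (String × Option String)) := [
  ("New York", [("new york", none), ("manhattan", none), ("brooklyn", none), ("queens", none), ("bronx", none), ("jersey city", some "new jersey"), ("hoboken", some "new jersey")]),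
  ("Boston", [("boston", none), ("cambridge", some "massachusetts"), ("somerville", some "massachusetts"), ("quincy", some "massachusetts")]),
  ("Chicago", [("chicago", none)]),
  ("San Francisco", [("san francisco", none), ("palo alto", none), ("mountain view", none), ("redwood city", none), ("menlo park", none), ("san mateo", none), ("sunnyvale", none), ("santa clara", none), ("oakland", none), ("san jose", none), ("foster city", none), ("burlingame", none)]),
  ("Los Angeles", [("los angeles", none), ("santa monica", none), ("culver city", none), ("el segundo", none), ("manhattan beach", none), ("west hollywood", none), ("pasadena", none), ("burbank", none), ("glendale", some "california"), ("long beach", some "california"), ("irvine", none), ("anaheim", none)]),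
  ("Seattle", [("seattle", none), ("bellevue", some "washington"), ("redmond", some "washington"), ("kirkland", some "washington"), ("tacoma", none)]),
  ("Austin", [("austin", some "texas")]),
  ("Dallas", [("dallas", none), ("fort worth", none), ("plano", some "texas"), ("irving", some "texas"), ("frisco", some "texas"), ("allen", some "texas"), ("arlington", some "texas")]),
  ("Houston", [("houston", none), ("the woodlands", none), ("sugar land", none), ("katy", some "texas")]),
  ("Atlanta", [("atlanta", none), ("alpharetta", none), ("buckhead", none), ("marietta", none), ("dunwoody", none)]),
  ("Washington DC", [("washington", some "district of columbia"), ("washington", some "dc"), ("arlington", some "virginia"), ("bethesda", some "maryland"), ("mclean", some "virginia"), ("tysons", none), ("reston", some "virginia"), ("falls church", none), ("alexandria", some "virginia")]),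
  ("Philadelphia", [("philadelphia", none), ("wilmington", some "delaware"), ("cherry hill", none), ("king of prussia", none)]),
  ("Miami", [("miami", none), ("fort lauderdale", none), ("boca raton", none), ("coral gables", none), ("doral", none)]),
  ("Denver", [("denver", none), ("boulder", some "colorado"), ("aurora", some "colorado"), ("lakewood", some "colorado"), ("englewood", some "colorado")]),
  ("Minneapolis", [("minneapolis", none), ("st. paul", none), ("saint paul", none), ("bloomington", some "minnesota"), ("eden prairie", none)]),
  ("Phoenix", [("phoenix", none), ("scottsdale", none), ("tempe", some "arizona"), ("chandler", some "arizona"), ("mesa", some "arizona"), ("gilbert", some "arizona")]),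
  ("Nashville", [("nashville", none), ("franklin", some "tennessee"), ("brentwood", some "tennessee")]),
  ("Charlotte", [("charlotte", some "north carolina")]),
  ("Raleigh", [("raleigh", none), ("durham", none), ("chapel hill", none), ("cary", none)]),
  ("Indianapolis", [("indianapolis", none)]),
  ("Columbus", [("columbus", some "ohio")]),
  ("San Diego", [("san diego", none)]),
  ("Portland", [("portland", some "oregon")]),
  ("Salt Lake City", [("salt lake city", none), ("provo", none)]),
  ("Kansas City", [("kansas city", none), ("overland park", none)]),
  ("St. Louis", [("st. louis", none), ("saint louis", none)]),
  ("Detroit", [("detroit", none), ("ann arbor", none), ("troy", some "michigan"), ("dearborn", none)]),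
  ("Pittsburgh", [("pittsburgh", none)]),
  ("Cincinnati", [("cincinnati", none)]),
  ("Cleveland", [("cleveland", none)]),
  ("Baltimore", [("baltimore", none)]),
  ("San Antonio", [("san antonio", none)]),
  ("Orlando", [("orlando", none)]),
  ("Tampa", [("tampa", none), ("st. petersburg", some "florida"), ("clearwater", none)]),
  ("Las Vegas", [("las vegas", none), ("henderson", some "nevada")])]

-- inner 'for sig_city, sig_state in signals' loop: true iff some signal matches
def innerScanA (cityL stateL : String) : List (String × Option String) → Bool
  | [] => false
  | (sc, ss) :: rest =>
      if cityL == sc && (match ss with | none => true | some s => PySem.Str.isIn s stateL)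
      then true else innerScanA cityL stateL rest

-- outer 'for market, signals in _MARKET_CITY_SIGNALS' loop
def scanMarketsA (cityL stateL : String) : List (String × List (String × Option String)) → String
  | [] => "Other"
  | (market, signals) :: rest =>
      if innerScanA cityL stateL signals then market else scanMarketsA cityL stateL rest

def city_market_py (city : String) (state : String) : String :=
  let cityL := PySem.Str.lower (PySem.Str.strip city)
  let stateL := PySem.Str.lower (PySem.Str.strip state)
  scanMarketsA cityL stateL marketCitySignals

-- ===== PORT B =====
-- _SIGNAL_RECS: B's compact encoding of the table, "city|state|market" records
def signalRecs : List String := [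
  "new york||New York",
  "manhattan||New York",
  "brooklyn||New York",
  "queens||New York",
  "bronx||New York",
  "jersey city|new jersey|New York",
  "hoboken|new jersey|New York",
  "boston||Boston",
  "cambridge|massachusetts|Boston",
  "somerville|massachusetts|Boston",
  "quincy|massachusetts|Boston",
  "chicago||Chicago",
  "san francisco||San Francisco",
  "palo alto||San Francisco",
  "mountain view||San Francisco",
  "redwood city||San Francisco",
  "menlo park||San Francisco",
  "san mateo||San Francisco",
  "sunnyvale||San Francisco",
  "santa clara||San Francisco",
  "oakland||San Francisco",
  "san jose||San Francisco",
  "foster city||San Francisco",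
  "burlingame||San Francisco",
  "los angeles||Los Angeles",
  "santa monica||Los Angeles",
  "culver city||Los Angeles",
  "el segundo||Los Angeles",
  "manhattan beach||Los Angeles",
  "west hollywood||Los Angeles",
  "pasadena||Los Angeles",
  "burbank||Los Angeles",
  "glendale|california|Los Angeles",
  "long beach|california|Los Angeles",
  "irvine||Los Angeles",
  "anaheim||Los Angeles",
  "seattle||Seattle",
  "bellevue|washington|Seattle",
  "redmond|washington|Seattle",
  "kirkland|washington|Seattle",
  "tacoma||Seattle",
  "austin|texas|Austin",
  "dallas||Dallas",
  "fort worth||Dallas",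
  "plano|texas|Dallas",
  "irving|texas|Dallas",
  "frisco|texas|Dallas",
  "allen|texas|Dallas",
  "arlington|texas|Dallas",
  "houston||Houston",
  "the woodlands||Houston",
  "sugar land||Houston",
  "katy|texas|Houston",
  "atlanta||Atlanta",
  "alpharetta||Atlanta",
  "buckhead||Atlanta",
  "marietta||Atlanta",
  "dunwoody||Atlanta",
  "washington|district of columbia|Washington DC",
  "washington|dc|Washington DC",
  "arlington|virginia|Washington DC",
  "bethesda|maryland|Washington DC",
  "mclean|virginia|Washington DC",
  "tysons||Washington DC",
  "reston|virginia|Washington DC",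
  "falls church||Washington DC",
  "alexandria|virginia|Washington DC",
  "philadelphia||Philadelphia",
  "wilmington|delaware|Philadelphia",
  "cherry hill||Philadelphia",
  "king of prussia||Philadelphia",
  "miami||Miami",
  "fort lauderdale||Miami",
  "boca raton||Miami",
  "coral gables||Miami",
  "doral||Miami",
  "denver||Denver",
  "boulder|colorado|Denver",
  "aurora|colorado|Denver",
  "lakewood|colorado|Denver",
  "englewood|colorado|Denver",
  "minneapolis||Minneapolis",
  "st. paul||Minneapolis",
  "saint paul||Minneapolis",
  "bloomington|minnesota|Minneapolis",
  "eden prairie||Minneapolis",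
  "phoenix||Phoenix",
  "scottsdale||Phoenix",
  "tempe|arizona|Phoenix",
  "chandler|arizona|Phoenix",
  "mesa|arizona|Phoenix",
  "gilbert|arizona|Phoenix",
  "nashville||Nashville",
  "franklin|tennessee|Nashville",
  "brentwood|tennessee|Nashville",
  "charlotte|north carolina|Charlotte",
  "raleigh||Raleigh",
  "durham||Raleigh",
  "chapel hill||Raleigh",
  "cary||Raleigh",
  "indianapolis||Indianapolis",
  "columbus|ohio|Columbus",
  "san diego||San Diego",
  "portland|oregon|Portland",
  "salt lake city||Salt Lake City",
  "provo||Salt Lake City",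
  "kansas city||Kansas City",
  "overland park||Kansas City",
  "st. louis||St. Louis",
  "saint louis||St. Louis",
  "detroit||Detroit",
  "ann arbor||Detroit",
  "troy|michigan|Detroit",
  "dearborn||Detroit",
  "pittsburgh||Pittsburgh",
  "cincinnati||Cincinnati",
  "cleveland||Cleveland",
  "baltimore||Baltimore",
  "san antonio||San Antonio",
  "orlando||Orlando",
  "tampa||Tampa",
  "st. petersburg|florida|Tampa",
  "clearwater||Tampa",
  "las vegas||Las Vegas",
  "henderson|nevada|Las Vegas"]

-- '_c, _s, _m = rec.split("|")' plus '_s or None' (records of the literal always have 3 fields)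
def parseRec (rec : String) : String × (Option String × String) :=
  match PySem.Str.split? rec "|" with
  | some [c, s, m] => (c, (if s == "" then none else some s, m))
  | _ => ("", (none, ""))

-- the import-time indexing loop: _CITY_INDEX.setdefault(_c, []).append((_s or None, _m))
def cityIndexB : PySem.Dict String (List (Option String × String)) :=
  signalRecs.foldl
    (fun d rec => let t := parseRec rec; d.modify t.1 [] (· ++ [t.2])) PySem.Dict.empty

-- the per-call scan over the city's candidate list
def scanCandsB (stateL : String) : List (Option String × String) → String
  | [] => "Other"
  | (ss, market) :: rest =>
      if (match ss with | none => true | some s => PySem.Str.isIn s stateL)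
      then market else scanCandsB stateL rest

def city_market_py_alt (city : String) (state : String) : String :=
  let stateL := PySem.Str.lower (PySem.Str.strip state)
  scanCandsB stateL (cityIndexB.getD (PySem.Str.lower (PySem.Str.strip city)) [])

-- ===== PRECONDITION & SPEC =====
def Spec_city_market_py (city : String) (state : String) (out : String) : Prop := out = city_market_py_alt city state
instance (city : String) (state : String) (out : String) : Decidable (Spec_city_market_py city state out) := by unfold Spec_city_market_py; infer_instance

-- ===== CLAIM (what is proved, stated in full; the proofs are below) =====
def Claim_equal_city_market_py : Prop := ∀ (city : String) (state : String), Dom_city_market_py city state → Spec_city_market_py city state (city_market_py city state)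

-- ===== LEMMAS AND PROOFS =====

-- proof-side view of the flattened table
def citySignalsFlat : List (String × (Option String × String)) :=
  marketCitySignals.flatMap (fun p => p.2.map (fun q => (q.1, (q.2, p.1))))

-- parsing B's encoded string yields exactly the flattened table
set_option maxRecDepth 4000 in
theorem parse_enc_eq_flat :
    signalRecs.map parseRec = citySignalsFlat := by rfl

-- B's candidate scan over one market's filtered signals equals A's inner scan, with a continuation tail
theorem scanCandsB_filter_block (cityL stateL m : String)
    (sigs : List (String × Option String)) (tail : List (Option String × String)) :
    scanCandsB stateL
      (((sigs.map (fun q => (q.1, (q.2, m)))).filter (fun p => p.1 == cityL)).map (·.2) ++ tail)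
    = if innerScanA cityL stateL sigs then m else scanCandsB stateL tail := by
  induction sigs with
  | nil => simp [innerScanA]
  | cons hd rest ih =>
      obtain ⟨sc, ss⟩ := hd
      by_cases hc : sc = cityL
      · subst hc
        simp only [List.map_cons, List.filter_cons, BEq.rfl, if_pos, List.map_cons, List.cons_append,
          innerScanA, Bool.true_and]
        cases ss with
        | none => simp [scanCandsB]
        | some s =>
            by_cases hin : PySem.Chars.isIn s.toList stateL.toList = true
            · simp [scanCandsB, hin]
            · simp only [Bool.not_eq_true] at hin
              simp [scanCandsB, hin, ih]
      · have h1 : (sc == cityL) = false := by simp [hc]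
        have h2 : (cityL == sc) = false := by simp [Ne.symm hc]
        simp [h1, innerScanA, h2, ih]

-- A's full nested scan equals B's scan of the filtered flattened table
theorem scanMarketsA_eq_filter (cityL stateL : String)
    (t : List (String × List (String × Option String))) :
    scanMarketsA cityL stateL t
    = scanCandsB stateL
        (((t.flatMap (fun p => p.2.map (fun q => (q.1, (q.2, p.1))))).filter
            (fun p => p.1 == cityL)).map (·.2)) := by
  induction t with
  | nil => simp [scanMarketsA, scanCandsB]
  | cons hd rest ih =>
      obtain ⟨m, sigs⟩ := hd
      simp only [List.flatMap_cons, List.filter_append, List.map_append]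
      rw [scanCandsB_filter_block, scanMarketsA]
      simp [ih]

theorem foldl_parse (l : List String) (d : PySem.Dict String (List (Option String × String))) :
    l.foldl (fun d rec => let t := parseRec rec; d.modify t.1 [] (· ++ [t.2])) d
    = (l.map parseRec).foldl
        (fun d (p : String × (Option String × String)) => d.modify p.1 [] (· ++ [p.2])) d := by
  induction l generalizing d with
  | nil => rfl
  | cons hd tl ih => simp only [List.foldl_cons, List.map_cons]; exact ih _

theorem cityIndexB_getD (cityL : String) :
    cityIndexB.getD cityL []
    = ((citySignalsFlat.filter (fun p => p.1 == cityL)).map (·.2)) := by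
  unfold cityIndexB
  rw [foldl_parse, parse_enc_eq_flat, PySem.Dict.getD_foldl_modify_append]
  simp

-- ===== VERDICT (by name: the statement is the Claim_ definition above) =====
theorem city_market_py_spec : Claim_equal_city_market_py := by
  intro city state _
  unfold Spec_city_market_py city_market_py city_market_py_alt
  rw [cityIndexB_getD]
  exact scanMarketsA_eq_filter _ _ _
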